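-- pv_equiv track=rewrite | github.com/Emvista/popcorn-dataset | src/pre_processing/1_tokenize_texts.py | correct_splitting
-- ===== SOURCE A (Python) =====
-- def rebuild_token(token: str, b_offset: int, delimiter="'") -> list:
--     """Split and add samples containing unitary tokens.
--     Args:
--         token (str): _description_
--         b_offset (int): _description_
--         delimiter (str, optional): _description_. Defaults to "'".
--     Returns:
--         list: _description_
--     """
--     corrected_split = []
--     subpart = ""
--     for char_index, char in enumerate(token):
--         if char == delimiter:
--             if subpart != "":
--                 corrected_split += [
--                     (
--                         subpart,
--                         (
--                             (
--                                 b_offset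
--                                 if len(corrected_split) == 0
--                                 else corrected_split[-1][1][1]
--                             ),
--                             b_offset + char_index,
--                         ),
--                     ),
--                     (char, (b_offset + char_index, b_offset + char_index + 1)),
--                 ]
--                 subpart = ""
--             else:
--                 corrected_split += [
--                     (char, (b_offset + char_index, b_offset + char_index + 1)),
--                 ]
--         else:
--             subpart += char
--     if len(subpart) > 0:
--         corrected_split.append(
--             (
--                 subpart,
--                 (
--                     (
--                         b_offset
--                         if len(corrected_split) == 0
--                         else corrected_split[-1][1][1]
--                     ),
--                     b_offset + char_index + 1,
--                 ),
--             )
--         )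
--     return corrected_split
--
-- def correct_splitting(text: list, delimiter="'") -> str:
--     """Split correctly each tokens given a delimiter of interest.
--
--     Args:
--         text (list): _description_
--         delimiter (str, optional): _description_. Defaults to "'".
--
--     Returns:
--         str: tokens with their offsets.
--     """
--     corrected_text = []
--     for token, (b_offset, e_offset) in text:
--         if token == "":
--             continue
--         if delimiter in token and len(token) > 1:
--             corrected_text += rebuild_token(token, b_offset, delimiter)
--         else:
--             corrected_text.append((token, (b_offset, e_offset)))
--     return corrected_text
-- ===== SOURCE B (Python) =====
-- def correct_splitting(text: list, delimiter="'") -> str: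
--     """Split correctly each tokens given a delimiter of interest (two-pass rebuild)."""
--     corrected_text = []
--     for token, (b_offset, e_offset) in text:
--         if token == "":
--             continue
--         if delimiter in token and len(token) > 1:
--             positions = [i for i, c in enumerate(token) if c == delimiter]
--             cur = 0
--             for p in positions:
--                 if p > cur:
--                     corrected_text.append((token[cur:p], (b_offset + cur, b_offset + p)))
--                 # token[p] == delimiter by construction of positions
--                 corrected_text.append((delimiter, (b_offset + p, b_offset + p + 1)))
--                 cur = p + 1
--             if cur < len(token):
--                 corrected_text.append((token[cur:], (b_offset + cur, b_offset + len(token))))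
--         else:
--             corrected_text.append((token, (b_offset, e_offset)))
--     return corrected_text
-- ===== Notes on version B (the rewrite author's own statement) =====
-- stated objective: alternative
-- what changed: rebuild_token's single accumulate-a-subpart pass (run start read back from the last emitted segment's end) is replaced by a two-pass decomposition: first collect the delimiter positions, then walk a cursor emitting runs and delimiters with offsets computed directly from the cursor and position.
import Mathlib
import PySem

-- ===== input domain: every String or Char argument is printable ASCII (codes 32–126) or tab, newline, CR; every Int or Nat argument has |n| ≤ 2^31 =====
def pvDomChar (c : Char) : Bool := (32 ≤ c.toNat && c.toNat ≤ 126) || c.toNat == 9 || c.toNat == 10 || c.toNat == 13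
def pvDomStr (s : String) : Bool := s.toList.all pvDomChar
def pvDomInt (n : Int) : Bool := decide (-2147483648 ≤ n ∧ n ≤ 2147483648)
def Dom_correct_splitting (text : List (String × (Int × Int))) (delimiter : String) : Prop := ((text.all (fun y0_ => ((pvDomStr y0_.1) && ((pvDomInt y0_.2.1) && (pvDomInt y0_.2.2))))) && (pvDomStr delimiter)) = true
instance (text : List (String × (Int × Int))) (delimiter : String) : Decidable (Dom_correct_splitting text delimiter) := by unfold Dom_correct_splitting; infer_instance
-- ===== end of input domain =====

-- B rebuilds split tokens from a precomputed delimiter-position list instead of A's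
-- accumulate-a-subpart single pass; same return value everywhere (objective: alternative).

-- ===== PORT A =====
-- corrected_split[-1][1][1] with the `b_offset if len(corrected_split)==0 else …` guard
def pvLastEnd (b : Int) (acc : List (String × (Int × Int))) : Int :=
  match acc.getLast? with
  | none => b
  | some x => x.2.2

-- the `for char_index, char in enumerate(token)` loop of rebuild_token; state = (acc, sub);
-- after the loop `char_index + 1 = len(token)` (= tlen; the loop ran over all of token,
-- and for an empty token sub = "" so the final append does not fire)
def pvRebuildLoop (d : String) (b : Int) (tlen : Nat) :
    List Char → Nat → List (String × (Int × Int)) → List Char → List (String × (Int × Int))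
  | [], _, acc, sub =>
      if sub.length > 0 then acc ++ [(String.ofList sub, (pvLastEnd b acc, b + tlen))] else acc
  | c :: cs, i, acc, sub =>
      if String.ofList [c] = d then
        if sub ≠ [] then
          pvRebuildLoop d b tlen cs (i + 1)
            (acc ++ [(String.ofList sub, (pvLastEnd b acc, b + i)),
                     (String.ofList [c], (b + i, b + i + 1))]) []
        else
          pvRebuildLoop d b tlen cs (i + 1)
            (acc ++ [(String.ofList [c], (b + i, b + i + 1))]) sub
      else
        pvRebuildLoop d b tlen cs (i + 1) acc (sub ++ [c])

def rebuild_token (token : String) (b_offset : Int) (delimiter : String) :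
    List (String × (Int × Int)) :=
  pvRebuildLoop delimiter b_offset token.toList.length token.toList 0 [] []

def correct_splitting (text : List (String × (Int × Int))) (delimiter : String) :
    List (String × (Int × Int)) :=
  match text with
  | [] => []
  | (token, (b_offset, e_offset)) :: rest =>
      (if token = "" then []
       else if PySem.Str.isIn delimiter token && decide (1 < PySem.Str.len token) then
         rebuild_token token b_offset delimiter
       else [(token, (b_offset, e_offset))]) ++ correct_splitting rest delimiter

-- ===== PORT B =====
-- `[i for i, c in enumerate(token) if c == delimiter]`
def pvPositions (d : String) : List Char → Nat → List Nat
  | [], _ => []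
  | c :: cs, i => (if String.ofList [c] = d then [i] else []) ++ pvPositions d cs (i + 1)

-- the `for p in positions` loop plus the trailing-run append; state = cur
def pvAltLoop (d : String) (b : Int) (chars : List Char) :
    List Nat → Nat → List (String × (Int × Int))
  | [], cur =>
      if cur < chars.length then
        [(String.ofList (chars.drop cur), (b + cur, b + chars.length))]
      else []
  | p :: ps, cur =>
      (if cur < p then
         [(String.ofList ((chars.drop cur).take (p - cur)), (b + cur, b + p))]
       else [])
      ++ (d, (b + p, b + p + 1)) :: pvAltLoop d b chars ps (p + 1)

def correct_splitting_alt (text : List (String × (Int × Int))) (delimiter : String) :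
    List (String × (Int × Int)) :=
  match text with
  | [] => []
  | (token, (b_offset, e_offset)) :: rest =>
      (if token = "" then []
       else if PySem.Str.isIn delimiter token && decide (1 < PySem.Str.len token) then
         pvAltLoop delimiter b_offset token.toList
           (pvPositions delimiter token.toList 0) 0
       else [(token, (b_offset, e_offset))]) ++ correct_splitting_alt rest delimiter

-- ===== PRECONDITION & SPEC =====
def Spec_correct_splitting (text : List (String × (Int × Int))) (delimiter : String) (out : List (String × (Int × Int))) : Prop := out = correct_splitting_alt text delimiter
instance (text : List (String × (Int × Int))) (delimiter : String) (out : List (String × (Int × Int))) : Decidable (Spec_correct_splitting text delimiter out) := by unfold Spec_correct_splitting; infer_instance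

-- ===== CLAIM (what is proved, stated in full; the proofs are below) =====
def Claim_equal_correct_splitting : Prop := ∀ (text : List (String × (Int × Int))) (delimiter : String), Dom_correct_splitting text delimiter → Spec_correct_splitting text delimiter (correct_splitting text delimiter)

-- ===== LEMMAS AND PROOFS =====

-- common recursive description of the rebuilt segments: remaining chars, absolute index i,
-- pending run sub that started at index st
def pvSegs (d : String) (b : Int) : List Char → Nat → List Char → Nat → List (String × (Int × Int))
  | [], i, sub, st => if sub = [] then [] else [(String.ofList sub, (b + st, b + i))]
  | c :: cs, i, sub, st =>
      if String.ofList [c] = d then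
        (if sub = [] then [] else [(String.ofList sub, (b + st, b + i))])
        ++ (String.ofList [c], (b + i, b + i + 1)) :: pvSegs d b cs (i + 1) [] (i + 1)
      else
        pvSegs d b cs (i + 1) (sub ++ [c]) st

lemma pvLastEnd_concat (b : Int) (acc : List (String × (Int × Int))) (x : String × (Int × Int)) :
    pvLastEnd b (acc ++ [x]) = x.2.2 := by
  simp [pvLastEnd]

lemma pvRebuildLoop_eq_segs (d : String) (b : Int) (tlen : Nat) :
    ∀ (cs : List Char) (i : Nat) (acc : List (String × (Int × Int))) (sub : List Char) (st : Nat),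
      i = st + sub.length → pvLastEnd b acc = b + st → i + cs.length = tlen →
      pvRebuildLoop d b tlen cs i acc sub = acc ++ pvSegs d b cs i sub st := by
  intro cs
  induction cs with
  | nil =>
      intro i acc sub st h1 h2 h3
      simp only [List.length_nil, Nat.add_zero] at h3
      subst h3
      by_cases hs : sub = []
      · simp [pvRebuildLoop, pvSegs, hs]
      · have : sub.length > 0 := List.length_pos_iff.mpr hs
        simp [pvRebuildLoop, pvSegs, hs, this, h2]
  | cons c cs ih =>
      intro i acc sub st h1 h2 h3
      by_cases hd : String.ofList [c] = d
      · by_cases hs : sub = []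
        · have hacc : pvLastEnd b (acc ++ [(String.ofList [c], ((b:Int) + i, b + i + 1))])
              = b + (i + 1) := by
            rw [pvLastEnd_concat]; push_cast; ring
          rw [pvRebuildLoop, if_pos hd]
          simp only [hs, ne_eq, not_true_eq_false, if_false]
          rw [ih (i + 1) _ [] (i + 1) (by simp) hacc
              (by simp only [List.length_cons] at h3; omega)]
          simp [pvSegs, hd]
        · have hacc : pvLastEnd b (acc ++ [(String.ofList sub, (b + st, (b:Int) + i)),
              (String.ofList [c], ((b:Int) + i, b + i + 1))]) = b + (i + 1) := by
            have : acc ++ [(String.ofList sub, (b + st, (b:Int) + i)),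
                (String.ofList [c], ((b:Int) + i, b + i + 1))]
              = (acc ++ [(String.ofList sub, (b + st, (b:Int) + i))])
                ++ [(String.ofList [c], ((b:Int) + i, b + i + 1))] := by simp
            rw [this, pvLastEnd_concat]; push_cast; ring
          rw [pvRebuildLoop, if_pos hd, if_pos hs, h2]
          rw [ih (i + 1) _ [] (i + 1) (by simp) hacc
              (by simp only [List.length_cons] at h3; omega)]
          simp [pvSegs, hd, hs]
      · rw [pvRebuildLoop, if_neg hd]
        rw [ih (i + 1) acc (sub ++ [c]) st (by simp [h1]; omega) h2
            (by simp only [List.length_cons] at h3; omega)]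
        simp [pvSegs, hd]

lemma pvAltLoop_eq_segs (d : String) (b : Int) (full : List Char) :
    ∀ (cs : List Char) (i cur : Nat),
      full.drop i = cs → cur ≤ i → i ≤ full.length →
      pvAltLoop d b full (pvPositions d cs i) cur
        = pvSegs d b cs i ((full.drop cur).take (i - cur)) cur := by
  intro cs
  induction cs with
  | nil =>
      intro i cur hdrop hcur hlen
      have hi : i = full.length := by
        have := List.drop_eq_nil_iff.mp hdrop; omega
      subst hi
      have hsub : (full.drop cur).take (full.length - cur) = full.drop cur := by
        apply List.take_of_length_le; simp
      by_cases h : cur < full.length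
      · have hne : full.drop cur ≠ [] := by
          simp [List.drop_eq_nil_iff]; omega
        simp [pvPositions, pvAltLoop, pvSegs, hsub, h, hne]
      · have : full.drop cur = [] := List.drop_eq_nil_iff.mpr (by omega)
        simp [pvPositions, pvAltLoop, pvSegs, h, this]
  | cons c cs ih =>
      intro i cur hdrop hcur hlen
      have hilt : i < full.length := by
        by_contra h
        have : full.drop i = [] := List.drop_eq_nil_iff.mpr (by omega)
        rw [this] at hdrop; simp at hdrop
      have hget : full[i] = c := by
        have : full.drop i = full[i] :: full.drop (i + 1) :=
          List.drop_eq_getElem_cons hilt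
        rw [this] at hdrop; exact (List.cons.injEq _ _ _ _ ▸ hdrop).1
      have hdrop' : full.drop (i + 1) = cs := by
        have : full.drop i = full[i] :: full.drop (i + 1) :=
          List.drop_eq_getElem_cons hilt
        rw [this] at hdrop; exact (List.cons.injEq _ _ _ _ ▸ hdrop).2
      have hdne : full.drop cur ≠ [] := by
        simp [List.drop_eq_nil_iff]; omega
      by_cases hd : String.ofList [c] = d
      · -- delimiter position i
        have hsub_empty : ((full.drop cur).take (i - cur) = []) ↔ i = cur := by
          constructor
          · intro h
            rcases List.take_eq_nil_iff.mp h with h | h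
            · omega
            · exact absurd h hdne
          · intro h; simp [h]
        rw [pvPositions, if_pos hd]
        simp only [List.singleton_append]
        rw [pvAltLoop]
        rw [ih (i + 1) (i + 1) hdrop' (le_refl _) (by omega)]
        rw [pvSegs, if_pos hd]
        by_cases hic : cur < i
        · have h1 : ¬ i = cur := by omega
          rw [if_pos hic, if_neg (fun h => h1 (hsub_empty.mp h))]
          simp [hd]
        · have h1 : i = cur := by omega
          rw [if_neg hic, if_pos (hsub_empty.mpr h1)]
          simp [hd, h1]
      · -- ordinary character at i
        have htake : (full.drop cur).take (i + 1 - cur)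
            = (full.drop cur).take (i - cur) ++ [c] := by
          have hlt : i - cur < (full.drop cur).length := by
            simp [List.length_drop]; omega
          have : (full.drop cur)[i - cur] = c := by
            rw [List.getElem_drop]
            have : cur + (i - cur) = i := by omega
            simp [this, hget]
          rw [show i + 1 - cur = (i - cur) + 1 by omega,
              List.take_add_one, List.getElem?_eq_getElem hlt, this]
          simp
        rw [pvPositions, if_neg hd]
        simp only [List.nil_append]
        rw [ih (i + 1) cur hdrop' (by omega) (by omega)]
        rw [pvSegs, if_neg hd, htake]

lemma rebuild_eq_alt (token : String) (b : Int) (d : String) :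
    rebuild_token token b d
      = pvAltLoop d b token.toList (pvPositions d token.toList 0) 0 := by
  rw [rebuild_token,
      pvRebuildLoop_eq_segs d b token.toList.length token.toList 0 [] [] 0
        (by simp) (by simp [pvLastEnd]) (by simp),
      pvAltLoop_eq_segs d b token.toList token.toList 0 0 (by simp) (le_refl 0)
        (Nat.zero_le _)]
  simp

lemma cs_eq (text : List (String × (Int × Int))) (delimiter : String) :
    correct_splitting text delimiter = correct_splitting_alt text delimiter := by
  induction text with
  | nil => rfl
  | cons hd tl ih =>
      obtain ⟨token, b_offset, e_offset⟩ := hd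
      rw [correct_splitting, correct_splitting_alt, ih, rebuild_eq_alt]

-- ===== VERDICT (by name: the statement is the Claim_ definition above) =====
theorem correct_splitting_spec : Claim_equal_correct_splitting := by
  intro text delimiter _
  exact cs_eq text delimiter
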